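-- pv_equiv track=rewrite | github.com/DmesonAnalysers/DmesonAnalysis | run3/flow/systematics/make_yaml_for_syst.py | find_2threshold
-- ===== SOURCE A (Python) =====
-- def find_2threshold(nPtBins, default_values, threshold_values):
--     lower_thresholds = []
--     lower_thresholds_2 = []
--     upper_thresholds = []
--     upper_thresholds_2 = []
--     center_values = []
--
--     threshold_values = sorted(threshold_values)
--
--     for iPt in range(nPtBins):
--         default_value = default_values[iPt]
--         lower_threshold, upper_threshold = default_value, default_value
--         lower_threshold_2, upper_threshold_2 = default_value, default_value
--         center_value = default_value
--         # if fit option can't be dependent on pt, then forcelly set the threshold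
--         for threshold_value in threshold_values:
--             if threshold_value < default_value:
--                 lower_threshold_2 = lower_threshold
--                 lower_threshold = threshold_value
--             elif threshold_value > default_value:
--                 upper_threshold = threshold_value
--                 break
--         for threshold_value in reversed(threshold_values):
--             if threshold_value > default_value:
--                 upper_threshold_2 = upper_threshold
--                 upper_threshold = threshold_value
--             elif threshold_value < default_value:
--                 lower_threshold = threshold_value
--                 break
--         lower_thresholds_2.append(lower_threshold_2)
--         lower_thresholds.append(lower_threshold)
--         upper_thresholds_2.append(upper_threshold_2)
--         upper_thresholds.append(upper_threshold)
--         center_values.append(center_value)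
--     return lower_thresholds, upper_thresholds, lower_thresholds_2, upper_thresholds_2, center_values
-- ===== SOURCE B (Python) =====
-- def _bisect_left(a, x):
--     # CPython's bisect.bisect_left loop (no imports available in this module)
--     lo, hi = 0, len(a)
--     while lo < hi:
--         mid = (lo + hi) // 2
--         if a[mid] < x:
--             lo = mid + 1
--         else:
--             hi = mid
--     return lo
--
--
-- def _bisect_right(a, x):
--     # CPython's bisect.bisect_right loop
--     lo, hi = 0, len(a)
--     while lo < hi:
--         mid = (lo + hi) // 2
--         if x < a[mid]:
--             hi = mid
--         else:
--             lo = mid + 1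
--     return lo
--
--
-- def find_2threshold(nPtBins, default_values, threshold_values):
--     ts = sorted(threshold_values)
--     n = len(ts)
--     lower_thresholds = []
--     upper_thresholds = []
--     lower_thresholds_2 = []
--     upper_thresholds_2 = []
--     center_values = []
--     for iPt in range(nPtBins):
--         d = default_values[iPt]
--         lo = _bisect_left(ts, d)    # thresholds below d are ts[:lo]
--         hi = _bisect_right(ts, d)   # thresholds above d are ts[hi:]
--         lower = ts[lo - 1] if lo >= 1 else d
--         lower_2 = ts[lo - 2] if lo >= 2 else d
--         upper = ts[hi] if hi < n else d
--         upper_2 = ts[hi + 1] if hi + 1 < n else upper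
--         lower_thresholds.append(lower)
--         upper_thresholds.append(upper)
--         lower_thresholds_2.append(lower_2)
--         upper_thresholds_2.append(upper_2)
--         center_values.append(d)
--     return lower_thresholds, upper_thresholds, lower_thresholds_2, upper_thresholds_2, center_values
-- ===== Notes on version B (the rewrite author's own statement) =====
-- stated objective: faster
-- what changed: Instead of two linear scans (forward and backward, with break) of the sorted threshold list for every pt bin, B sorts once and per bin locates the boundary with two hand-rolled binary searches (bisect_left/bisect_right), reading the two neighbours on each side by index.
import Mathlib
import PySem

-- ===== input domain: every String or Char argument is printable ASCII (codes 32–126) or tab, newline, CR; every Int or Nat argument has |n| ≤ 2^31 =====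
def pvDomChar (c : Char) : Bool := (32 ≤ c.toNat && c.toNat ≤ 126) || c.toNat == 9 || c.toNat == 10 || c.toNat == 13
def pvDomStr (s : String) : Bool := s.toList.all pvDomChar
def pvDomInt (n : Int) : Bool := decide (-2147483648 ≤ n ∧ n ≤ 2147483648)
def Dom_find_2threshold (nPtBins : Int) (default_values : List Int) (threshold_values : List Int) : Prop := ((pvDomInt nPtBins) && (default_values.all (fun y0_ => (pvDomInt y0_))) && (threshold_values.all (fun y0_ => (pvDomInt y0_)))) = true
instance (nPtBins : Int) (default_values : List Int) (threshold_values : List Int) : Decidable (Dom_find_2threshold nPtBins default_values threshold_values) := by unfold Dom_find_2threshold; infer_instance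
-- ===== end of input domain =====

-- B replaces A's two per-bin linear scans of the sorted threshold list by one sort plus
-- two binary searches per bin (objective: faster).

-- ===== PORT A =====
-- first inner loop: 'for threshold_value in threshold_values: …' with break; state (lower, lower_2, upper)
def pvLoop1 (d : Int) : List Int → Int × Int × Int → Int × Int × Int
  | [], s => s
  | t :: rest, (l, l2, u) =>
    if t < d then pvLoop1 d rest (t, l, u)
    else if d < t then (l, l2, t)
    else pvLoop1 d rest (l, l2, u)

-- second inner loop: 'for threshold_value in reversed(threshold_values): …'; state (lower, upper, upper_2)
def pvLoop2 (d : Int) : List Int → Int × Int × Int → Int × Int × Int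
  | [], s => s
  | t :: rest, (l, u, u2) =>
    if d < t then pvLoop2 d rest (l, t, u)
    else if t < d then (t, u, u2)
    else pvLoop2 d rest (l, u, u2)

-- body of A's 'for iPt in range(nPtBins)' loop (dv[iPt] is in range under Pre_; Python raises outside it)
def pvAStep (ts dv : List Int)
    (acc : List Int × List Int × List Int × List Int × List Int) (iPt : Int) :
    List Int × List Int × List Int × List Int × List Int :=
  let d := PySem.List.pyGetD dv iPt 0
  let s1 := pvLoop1 d ts (d, d, d)
  let s2 := pvLoop2 d ts.reverse (s1.1, s1.2.2, d)
  (acc.1 ++ [s2.1], acc.2.1 ++ [s2.2.1], acc.2.2.1 ++ [s1.2.1],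
    acc.2.2.2.1 ++ [s2.2.2], acc.2.2.2.2 ++ [d])

def find_2threshold (nPtBins : Int) (default_values : List Int) (threshold_values : List Int) :
    List Int × List Int × List Int × List Int × List Int :=
  let ts := PySem.List.sorted threshold_values (fun x => x) false
  (PySem.List.pyRange 0 nPtBins 1).foldl (pvAStep ts default_values) ([], [], [], [], [])

-- ===== PORT B =====
-- Source B's _bisect_left/_bisect_right are the verbatim CPython bisect loops; PySem.List.bisectLeft /
-- bisectRight are that exact lo/hi-halving loop, so they are the faithful port of those helpers.
-- body of B's 'for iPt in range(nPtBins)' loop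
def pvBStep (ts : List Int) (n : Nat) (dv : List Int)
    (acc : List Int × List Int × List Int × List Int × List Int) (iPt : Int) :
    List Int × List Int × List Int × List Int × List Int :=
  let d := PySem.List.pyGetD dv iPt 0
  let lo := PySem.List.bisectLeft ts d
  let hi := PySem.List.bisectRight ts d
  let lower := if 1 ≤ lo then ts.getD (lo - 1) 0 else d
  let lower2 := if 2 ≤ lo then ts.getD (lo - 2) 0 else d
  let upper := if hi < n then ts.getD hi 0 else d
  let upper2 := if hi + 1 < n then ts.getD (hi + 1) 0 else upper
  (acc.1 ++ [lower], acc.2.1 ++ [upper], acc.2.2.1 ++ [lower2],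
    acc.2.2.2.1 ++ [upper2], acc.2.2.2.2 ++ [d])

def find_2threshold_alt (nPtBins : Int) (default_values : List Int) (threshold_values : List Int) :
    List Int × List Int × List Int × List Int × List Int :=
  let ts := PySem.List.sorted threshold_values (fun x => x) false
  let n := ts.length
  (PySem.List.pyRange 0 nPtBins 1).foldl (pvBStep ts n default_values) ([], [], [], [], [])

-- ===== PRECONDITION & SPEC =====
-- Pre_ excludes exactly the inputs where A raises IndexError (default_values[iPt] with
-- nPtBins > len(default_values)); B raises there too.
def Pre_find_2threshold (nPtBins : Int) (default_values : List Int) (threshold_values : List Int) : Prop :=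
  nPtBins ≤ (default_values.length : Int)
instance (nPtBins : Int) (default_values : List Int) (threshold_values : List Int) : Decidable (Pre_find_2threshold nPtBins default_values threshold_values) := by unfold Pre_find_2threshold; infer_instance
def pvWitness_find_2threshold : Int × List Int × List Int := (2, [3, 5], [1, 4, 9])

def Spec_find_2threshold (nPtBins : Int) (default_values : List Int) (threshold_values : List Int) (out : List Int × List Int × List Int × List Int × List Int) : Prop := out = find_2threshold_alt nPtBins default_values threshold_values
instance (nPtBins : Int) (default_values : List Int) (threshold_values : List Int) (out : List Int × List Int × List Int × List Int × List Int) : Decidable (Spec_find_2threshold nPtBins default_values threshold_values out) := by unfold Spec_find_2threshold; infer_instance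

-- ===== CLAIM (what is proved, stated in full; the proofs are below) =====
def Claim_equal_find_2threshold : Prop := ∀ (nPtBins : Int) (default_values : List Int) (threshold_values : List Int), Dom_find_2threshold nPtBins default_values threshold_values → Pre_find_2threshold nPtBins default_values threshold_values → Spec_find_2threshold nPtBins default_values threshold_values (find_2threshold nPtBins default_values threshold_values)

-- ===== LEMMAS AND PROOFS =====

theorem headD_app_single (xs : List Int) (c z : Int) : (xs ++ [c]).headD z = xs.headD c := by
  cases xs <;> simp

theorem tail_headD_shift (xs : List Int) (t l l2 : Int) :
    ((xs ++ [t]) ++ [l]).tail.headD l2 = (xs ++ [t]).tail.headD l := by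
  cases xs with
  | nil => simp
  | cons x xs' => simp

theorem headD_headD (U : List Int) (d : Int) : U.headD (U.headD d) = U.headD d := by
  cases U <;> simp

theorem cons_rev_tail_headD (L : List Int) (z : Int) :
    (z :: L).reverse.tail.headD z = L.reverse.tail.headD z := by
  cases L with
  | nil => simp
  | cons x xs =>
    simp only [List.reverse_cons]
    exact tail_headD_shift xs.reverse x z z

theorem up2_shape (U : List Int) (d : Int) :
    (U.headD d :: U.reverse).reverse.tail.headD d = U.tail.headD (U.headD d) := by
  cases U with
  | nil => simp
  | cons u U' =>
    simp only [List.headD_cons, List.reverse_cons, List.reverse_append, List.reverse_reverse,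
      List.reverse_nil, List.nil_append, List.cons_append, List.tail_cons]
    exact headD_app_single _ _ _

-- a sorted list splits into the elements below, equal to and above d
theorem sorted_decomp (ts : List Int) (d : Int) (hs : ts.Pairwise (· ≤ ·)) :
    ∃ L M U : List Int, ts = L ++ (M ++ U) ∧ (∀ x ∈ L, x < d) ∧ (∀ x ∈ M, x = d) ∧ (∀ x ∈ U, d < x) := by
  induction ts with
  | nil => exact ⟨[], [], [], by simp, by simp, by simp, by simp⟩
  | cons t rest ih =>
    rw [List.pairwise_cons] at hs
    obtain ⟨hle, hrest⟩ := hs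
    obtain ⟨L, M, U, heq, hL, hM, hU⟩ := ih hrest
    rcases lt_trichotomy t d with h | h | h
    · exact ⟨t :: L, M, U, by simp [heq], by
        intro x hx; rcases List.mem_cons.1 hx with hx | hx
        · exact hx ▸ h
        · exact hL x hx, hM, hU⟩
    · have hLnil : L = [] := by
        rcases L with _ | ⟨x, L'⟩
        · rfl
        · exfalso
          have hx : x ∈ rest := by rw [heq]; simp
          have := hle x hx
          have := hL x (by simp)
          omega
      refine ⟨[], t :: M, U, by simp [heq, hLnil], by simp, ?_, hU⟩
      intro x hx; rcases List.mem_cons.1 hx with hx | hx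
      · exact hx.trans h
      · exact hM x hx
    · have hLnil : L = [] := by
        rcases L with _ | ⟨x, L'⟩
        · rfl
        · exfalso
          have hx : x ∈ rest := by rw [heq]; simp
          have := hle x hx
          have := hL x (by simp)
          omega
      have hMnil : M = [] := by
        rcases M with _ | ⟨x, M'⟩
        · rfl
        · exfalso
          have hx : x ∈ rest := by rw [heq]; simp
          have := hle x hx
          have := hM x (by simp)
          omega
      refine ⟨[], [], t :: U, by simp [heq, hLnil, hMnil], by simp, by simp, ?_⟩
      intro x hx; rcases List.mem_cons.1 hx with hx | hx
      · exact hx ▸ h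
      · exact hU x hx

-- A's first inner loop over the part below d shifts (lower, lower_2) like a 2-register
theorem pvLoop1_lt (d : Int) (L : List Int) : ∀ (rest : List Int) (l l2 u : Int), (∀ t ∈ L, t < d) →
    pvLoop1 d (L ++ rest) (l, l2, u)
      = pvLoop1 d rest (L.reverse.headD l, (l :: L).reverse.tail.headD l2, u) := by
  induction L with
  | nil => intro rest l l2 u _; simp
  | cons t L' ih =>
    intro rest l l2 u h
    have ht : t < d := h t (by simp)
    have hrec := ih rest t l u (fun x hx => h x (by simp [hx]))
    simp only [List.cons_append, pvLoop1, if_pos ht] at *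
    rw [hrec]
    have h1 : (t :: L').reverse.headD l = L'.reverse.headD t := by
      simp only [List.reverse_cons]; exact headD_app_single _ _ _
    have h2 : (l :: t :: L').reverse.tail.headD l2 = (t :: L').reverse.tail.headD l := by
      simp only [List.reverse_cons]; exact tail_headD_shift _ _ _ _
    rw [h1, h2]

theorem pvLoop1_eq (d : Int) (M : List Int) : ∀ (rest : List Int) (l l2 u : Int), (∀ t ∈ M, t = d) →
    pvLoop1 d (M ++ rest) (l, l2, u) = pvLoop1 d rest (l, l2, u) := by
  induction M with
  | nil => intro rest l l2 u _; simp
  | cons t M' ih =>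
    intro rest l l2 u h
    have ht : t = d := h t (by simp)
    simp only [List.cons_append, pvLoop1, ht, lt_irrefl]
    exact ih rest l l2 u (fun x hx => h x (by simp [hx]))

theorem pvLoop1_gt (d : Int) (U : List Int) (l l2 u : Int) (hU : ∀ t ∈ U, d < t) :
    pvLoop1 d U (l, l2, u) = (l, l2, U.headD u) := by
  cases U with
  | nil => simp [pvLoop1]
  | cons t U' =>
    have ht : d < t := hU t (by simp)
    simp [pvLoop1, not_lt_of_gt ht, ht]

theorem pvLoop2_gt (d : Int) (K : List Int) : ∀ (rest : List Int) (l u u2 : Int), (∀ t ∈ K, d < t) →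
    pvLoop2 d (K ++ rest) (l, u, u2)
      = pvLoop2 d rest (l, K.reverse.headD u, (u :: K).reverse.tail.headD u2) := by
  induction K with
  | nil => intro rest l u u2 _; simp
  | cons t K' ih =>
    intro rest l u u2 h
    have ht : d < t := h t (by simp)
    have hrec := ih rest l t u (fun x hx => h x (by simp [hx]))
    simp only [List.cons_append, pvLoop2, if_pos ht] at *
    rw [hrec]
    have h1 : (t :: K').reverse.headD u = K'.reverse.headD t := by
      simp only [List.reverse_cons]; exact headD_app_single _ _ _
    have h2 : (u :: t :: K').reverse.tail.headD u2 = (t :: K').reverse.tail.headD u := by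
      simp only [List.reverse_cons]; exact tail_headD_shift _ _ _ _
    rw [h1, h2]

theorem pvLoop2_eq (d : Int) (M : List Int) : ∀ (rest : List Int) (l u u2 : Int), (∀ t ∈ M, t = d) →
    pvLoop2 d (M ++ rest) (l, u, u2) = pvLoop2 d rest (l, u, u2) := by
  induction M with
  | nil => intro rest l u u2 _; simp
  | cons t M' ih =>
    intro rest l u u2 h
    have ht : t = d := h t (by simp)
    simp only [List.cons_append, pvLoop2, ht, lt_irrefl]
    exact ih rest l u u2 (fun x hx => h x (by simp [hx]))

theorem pvLoop2_lt (d : Int) (K : List Int) (l u u2 : Int) (hK : ∀ t ∈ K, t < d) :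
    pvLoop2 d K (l, u, u2) = (K.headD l, u, u2) := by
  cases K with
  | nil => simp [pvLoop2]
  | cons t K' =>
    have ht : t < d := hK t (by simp)
    simp [pvLoop2, not_lt_of_gt ht, ht]

-- bisect_left on the sorted list lands exactly at the boundary below d
theorem bisectLeft_eq (d : Int) (L M U : List Int)
    (hL : ∀ x ∈ L, x < d) (hM : ∀ x ∈ M, x = d) (hU : ∀ x ∈ U, d < x)
    (hs : (L ++ (M ++ U)).Pairwise (· ≤ ·)) :
    PySem.List.bisectLeft (L ++ (M ++ U)) d = L.length := by
  obtain ⟨h1, h2, h3⟩ := PySem.List.bisectLeft_spec (L ++ (M ++ U)) d hs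
  have hlen : (L ++ (M ++ U)).length = L.length + (M.length + U.length) := by simp
  rcases Nat.lt_trichotomy (PySem.List.bisectLeft (L ++ (M ++ U)) d) L.length with h | h | h
  · exfalso
    have hlt : PySem.List.bisectLeft (L ++ (M ++ U)) d < (L ++ (M ++ U)).length := by omega
    have hd := h3 _ hlt (le_refl _)
    rw [List.getElem_append_left h] at hd
    have := hL _ (List.getElem_mem h)
    omega
  · exact h
  · exfalso
    have hj : L.length < (L ++ (M ++ U)).length := by omega
    have hlt := h2 L.length hj h
    rw [List.getElem_append_right (le_refl _)] at hlt
    have hmem := List.getElem_mem (l := M ++ U) (n := L.length - L.length) (by simp at hj ⊢; omega)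
    rcases List.mem_append.1 hmem with hm | hu
    · have := hM _ hm; omega
    · have := hU _ hu; omega

-- bisect_right on the sorted list lands exactly at the boundary above d
theorem bisectRight_eq (d : Int) (L M U : List Int)
    (hL : ∀ x ∈ L, x < d) (hM : ∀ x ∈ M, x = d) (hU : ∀ x ∈ U, d < x)
    (hs : (L ++ (M ++ U)).Pairwise (· ≤ ·)) :
    PySem.List.bisectRight (L ++ (M ++ U)) d = L.length + M.length := by
  obtain ⟨h1, h2, h3⟩ := PySem.List.bisectRight_spec (L ++ (M ++ U)) d hs
  have hlen : (L ++ (M ++ U)).length = L.length + (M.length + U.length) := by simp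
  have hval : ∀ (j : Nat) (hj : j < (L ++ (M ++ U)).length), j < L.length + M.length →
      (L ++ (M ++ U))[j] ≤ d := by
    intro j hj hjlm
    by_cases hjl : j < L.length
    · rw [List.getElem_append_left hjl]
      have := hL _ (List.getElem_mem hjl)
      omega
    · rw [Nat.not_lt] at hjl
      have hjm : j - L.length < M.length := by omega
      rw [List.getElem_append_right hjl, List.getElem_append_left hjm]
      have := hM _ (List.getElem_mem hjm)
      omega
  rcases Nat.lt_trichotomy (PySem.List.bisectRight (L ++ (M ++ U)) d) (L.length + M.length) with h | h | h
  · exfalso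
    have hlt : PySem.List.bisectRight (L ++ (M ++ U)) d < (L ++ (M ++ U)).length := by omega
    have hd := h3 _ hlt (le_refl _)
    have := hval _ hlt h
    omega
  · exact h
  · exfalso
    have hj : L.length + M.length < (L ++ (M ++ U)).length := by omega
    have hlt := h2 _ hj h
    rw [List.getElem_append_right (by omega : L.length ≤ L.length + M.length),
        List.getElem_append_right (by omega : M.length ≤ L.length + M.length - L.length)] at hlt
    have hu0 : L.length + M.length - L.length - M.length < U.length := by omega
    have := hU _ (List.getElem_mem hu0)
    omega

-- B's neighbour reads by index, expressed over the decomposition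
theorem b_low (L R : List Int) (d : Int) :
    (if 1 ≤ L.length then (L ++ R).getD (L.length - 1) 0 else d) = L.reverse.headD d := by
  rcases L.eq_nil_or_concat with rfl | ⟨ys, y, rfl⟩
  · simp
  · simp only [List.concat_eq_append]
    rw [if_pos (by simp)]
    have hidx : (ys ++ [y]).length - 1 = ys.length := by simp
    rw [hidx]
    have h1 : ((ys ++ [y]) ++ R).getD ys.length 0 = y := by
      rw [List.getD_eq_getElem _ _ (by simp)]
      rw [List.getElem_append_left (by simp)]
      simp
    rw [h1]
    simp

theorem b_low2 (L R : List Int) (d : Int) :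
    (if 2 ≤ L.length then (L ++ R).getD (L.length - 2) 0 else d) = L.reverse.tail.headD d := by
  rcases L.eq_nil_or_concat with rfl | ⟨ys, y, rfl⟩
  · simp
  · rcases ys.eq_nil_or_concat with rfl | ⟨zs, z, rfl⟩
    · simp
    · simp only [List.concat_eq_append]
      rw [if_pos (by simp)]
      have hidx : ((zs ++ [z]) ++ [y]).length - 2 = zs.length := by simp
      rw [hidx]
      have h1 : (((zs ++ [z]) ++ [y]) ++ R).getD zs.length 0 = z := by
        rw [List.getD_eq_getElem _ _ (by simp)]
        rw [List.getElem_append_left (by simp), List.getElem_append_left (by simp)]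
        simp
      rw [h1]
      simp

theorem b_up (L M U : List Int) (d : Int) :
    (if L.length + M.length < (L ++ (M ++ U)).length
     then (L ++ (M ++ U)).getD (L.length + M.length) 0 else d) = U.headD d := by
  cases U with
  | nil => simp
  | cons u U' =>
    rw [if_pos (by simp)]
    have h1 : (L ++ (M ++ u :: U')).getD (L.length + M.length) 0 = u := by
      rw [show L ++ (M ++ u :: U') = (L ++ M) ++ u :: U' by simp]
      rw [List.getD_eq_getElem _ _ (by simp)]
      rw [List.getElem_append_right (by simp)]
      simp
    rw [h1]; rfl

theorem b_up2 (L M U : List Int) (d : Int) :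
    (if L.length + M.length + 1 < (L ++ (M ++ U)).length
     then (L ++ (M ++ U)).getD (L.length + M.length + 1) 0
     else if L.length + M.length < (L ++ (M ++ U)).length
     then (L ++ (M ++ U)).getD (L.length + M.length) 0 else d)
      = U.tail.headD (U.headD d) := by
  match U with
  | [] => simp
  | [u] =>
    rw [if_neg (by simp; omega), if_pos (by simp)]
    have h1 : (L ++ (M ++ [u])).getD (L.length + M.length) 0 = u := by
      rw [show L ++ (M ++ [u]) = (L ++ M) ++ [u] by simp]
      rw [List.getD_eq_getElem _ _ (by simp)]
      rw [List.getElem_append_right (by simp)]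
      simp
    rw [h1]; rfl
  | u :: v :: U' =>
    rw [if_pos (by simp; omega)]
    have h1 : (L ++ (M ++ u :: v :: U')).getD (L.length + M.length + 1) 0 = v := by
      rw [show L ++ (M ++ u :: v :: U') = (L ++ M) ++ u :: v :: U' by simp]
      rw [List.getD_eq_getElem _ _ (by simp; omega)]
      rw [List.getElem_append_right (by simp)]
      have hx : L.length + M.length + 1 - (L ++ M).length = 1 := by simp
      simp only [hx]
      simp
    rw [h1]; rfl

-- per-bin agreement of A's loop body and B's bisect body on a sorted threshold list
theorem step_eq (ts dv : List Int) (hs : ts.Pairwise (· ≤ ·))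
    (acc : List Int × List Int × List Int × List Int × List Int) (i : Int) :
    pvAStep ts dv acc i = pvBStep ts ts.length dv acc i := by
  obtain ⟨L, M, U, heq, hL, hM, hU⟩ := sorted_decomp ts (PySem.List.pyGetD dv i 0) hs
  subst heq
  simp only [pvAStep, pvBStep]
  rw [bisectLeft_eq _ L M U hL hM hU hs, bisectRight_eq _ L M U hL hM hU hs]
  rw [pvLoop1_lt _ L (M ++ U) _ _ _ hL, pvLoop1_eq _ M U _ _ _ hM, pvLoop1_gt _ U _ _ _ hU,
    cons_rev_tail_headD]
  have hrev : (L ++ (M ++ U)).reverse = U.reverse ++ (M.reverse ++ L.reverse) := by simp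
  rw [hrev]
  rw [pvLoop2_gt _ U.reverse _ _ _ _ (fun t ht => hU t (List.mem_reverse.1 ht)),
    pvLoop2_eq _ M.reverse _ _ _ _ (fun t ht => hM t (List.mem_reverse.1 ht)),
    pvLoop2_lt _ L.reverse _ _ _ (fun t ht => hL t (List.mem_reverse.1 ht))]
  rw [List.reverse_reverse, headD_headD, headD_headD, up2_shape]
  rw [b_low L (M ++ U), b_low2 L (M ++ U), b_up2 L M U, b_up L M U]

-- ===== VERDICT (by name: the statement is the Claim_ definition above) =====
theorem find_2threshold_spec : Claim_equal_find_2threshold := by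
  intro nPtBins dv tv _hDom _hPre
  unfold Spec_find_2threshold find_2threshold find_2threshold_alt
  have hs : (PySem.List.sorted tv (fun x => x) false).Pairwise (· ≤ ·) := by
    have := PySem.List.sorted_pairwise tv (fun x => x)
    simpa using this
  have hstep : pvAStep (PySem.List.sorted tv (fun x => x) false) dv
      = pvBStep (PySem.List.sorted tv (fun x => x) false) (PySem.List.sorted tv (fun x => x) false).length dv := by
    funext acc i
    exact step_eq _ dv hs acc i
  simp only [hstep]
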